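-- pv_equiv track=rewrite | github.com/pypi-data/pypi-mirror-99 | packages/lightning-grid/lightning-grid-0.3.53.tar.gz/lightning-grid-0.3.53/grid/dependency_manager.py | _yield_valid_lines
-- ===== SOURCE A (Python) =====
-- def _yield_valid_lines(content):
--     """Yield valid lines from requirements.txt
--     """
--     lines = (line for line in content.splitlines())
--     for line in lines:
--         line = line.strip()
--         if not line or line.startswith("#"):
--             continue
--         # Drop comments but not # in a URL
--         if ' #' in line:
--             line = line[:line.find(' #')]
--         # line continuations
--         if line.endswith('\\'):
--             line = line[:-2].strip()
--             try:
--                 line += next(lines)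
--             except StopIteration:
--                 return
--         yield line
-- ===== SOURCE B (Python) =====
-- def _yield_valid_lines(content):
--     # State-machine fold: 'pending' holds a continuation prefix awaiting the next
--     # raw line; no lookahead, each line is consumed exactly once.
--     out = []
--     pending = None
--     for raw in content.splitlines():
--         if pending is not None:
--             out.append(pending + raw)
--             pending = None
--             continue
--         line = raw.strip()
--         if not line or line.startswith("#"):
--             continue
--         if ' #' in line:
--             line = line[:line.find(' #')]
--         if line.endswith('\\'):
--             pending = line[:-2].strip()
--         else:
--             out.append(line)
--     return out
-- ===== Notes on version B (the rewrite author's own statement) =====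
-- stated objective: alternative
-- what changed: Replaces the lookahead-driven loop (a generator consumed via next() inside itself) by a lookahead-free state-machine fold: a uniform loop consuming each line exactly once while carrying an optional pending continuation prefix, with a trailing pending prefix dropped at the end.
import Mathlib
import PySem

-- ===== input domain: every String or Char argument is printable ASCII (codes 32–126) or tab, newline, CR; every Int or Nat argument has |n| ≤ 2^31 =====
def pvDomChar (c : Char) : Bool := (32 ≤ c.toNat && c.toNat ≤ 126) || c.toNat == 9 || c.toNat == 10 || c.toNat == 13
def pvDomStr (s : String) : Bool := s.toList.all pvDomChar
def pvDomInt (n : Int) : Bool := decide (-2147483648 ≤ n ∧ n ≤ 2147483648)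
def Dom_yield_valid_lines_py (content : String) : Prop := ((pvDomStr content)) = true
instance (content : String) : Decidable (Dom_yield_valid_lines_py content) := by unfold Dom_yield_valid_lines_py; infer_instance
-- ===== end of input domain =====

-- B replaces A's lookahead loop (generator consumed via next() inside itself) by a
-- lookahead-free state-machine fold carrying an optional pending continuation prefix
-- (objective: alternative decomposition; same values).


-- ===== PORT A =====
-- Per-line processing that appears verbatim in both Pythons (strip; skip blank/'#';
-- drop ' #' comment; detect a '\'-continuation, whose payload is line[:-2].strip()):
inductive PvAct
  | skip
  | emit (s : String)
  | cont (s : String)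

def pvProcessLine (l : String) : PvAct :=
  let line := PySem.Str.strip l
  if line == "" || PySem.Str.startswith line "#" then .skip
  else
    let line := if PySem.Str.isIn " #" line then
        PySem.Str.slice line none (some (PySem.Str.find line " #")) else line
    if PySem.Str.endswith line "\\" then
      .cont (PySem.Str.strip (PySem.Str.slice line none (some (-2))))
    else .emit line

-- A's 'for line in lines' generator loop; next(lines) consumes the raw following element,
-- and StopIteration ('return') yields nothing more.
def pvALoop : List String → List String
  | [] => []
  | l :: rest =>
    match pvProcessLine l with
    | .skip => pvALoop rest
    | .emit s => s :: pvALoop rest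
    | .cont s =>
      match rest with
      | [] => []
      | nxt :: rest' => (s ++ nxt) :: pvALoop rest'

def yield_valid_lines_py (content : String) : List String :=
  pvALoop (PySem.Str.splitlines content)

-- ===== PORT B =====
-- Source B's state-machine loop body: state = (out, pending); a pending continuation prefix
-- absorbs the next raw line, otherwise the line is processed as in the Python.
def pvStep (acc : List String × Option String) (raw : String) : List String × Option String :=
  match acc.2 with
  | some p => (acc.1 ++ [p ++ raw], none)
  | none =>
    match pvProcessLine raw with
    | .skip => (acc.1, none)
    | .emit s => (acc.1 ++ [s], none)
    | .cont s => (acc.1, some s)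

-- the for-loop is a fold over the lines; a trailing pending prefix is dropped (.1).
def yield_valid_lines_py_alt (content : String) : List String :=
  (List.foldl pvStep ([], none) (PySem.Str.splitlines content)).1

-- ===== PRECONDITION & SPEC =====
def Spec_yield_valid_lines_py (content : String) (out : List String) : Prop := out = yield_valid_lines_py_alt content
instance (content : String) (out : List String) : Decidable (Spec_yield_valid_lines_py content out) := by unfold Spec_yield_valid_lines_py; infer_instance

-- ===== CLAIM (what is proved, stated in full; the proofs are below) =====
def Claim_equal_yield_valid_lines_py : Prop := ∀ (content : String), Dom_yield_valid_lines_py content → Spec_yield_valid_lines_py content (yield_valid_lines_py content)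

-- ===== LEMMAS AND PROOFS =====

-- The fold started with no pending prefix appends exactly A's loop output.
theorem pvFold_eq (lines : List String) :
    ∀ out, (List.foldl pvStep (out, none) lines).1 = out ++ pvALoop lines := by
  induction lines using pvALoop.induct with
  | case1 => intro out; simp [pvALoop]
  | case2 l rest h ih =>
    intro out
    simp only [List.foldl_cons, pvStep, h, pvALoop, ih]
  | case3 l rest s h ih =>
    intro out
    simp only [List.foldl_cons, pvStep, h, pvALoop, ih]
    simp
  | case4 l s h =>
    intro out
    simp [pvStep, h, pvALoop]
  | case5 l s h nxt rest' ih =>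
    intro out
    simp only [List.foldl_cons, pvStep, h, pvALoop, ih]
    simp

-- ===== VERDICT (by name: the statement is the Claim_ definition above) =====
theorem yield_valid_lines_py_spec : Claim_equal_yield_valid_lines_py := by
  intro content _
  unfold Spec_yield_valid_lines_py yield_valid_lines_py yield_valid_lines_py_alt
  simpa using (pvFold_eq (PySem.Str.splitlines content) []).symm
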